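-- pv_equiv track=rewrite | github.com/Jacoblightning/yabafoc | yabafoc.py | clean_bf
-- ===== SOURCE A (Python) =====
-- def clean_bf(bf: str, dlc: bool) -> list[str]:
--     clean = []
--     for line in bf.split("\n"):
--         for char in line:
--             # We follow both bf standards:
--             # Any char that is not valid is ignored
--             # and anything after a # is ignored
--             if char == "#" and not dlc:
--                 break
--
--             if char not in [">", "<", "+", "-", ".", ",", "[", "]"]:
--                 continue
--
--             clean.append(char)
--     return clean
-- ===== SOURCE B (Python) =====
-- def clean_bf(bf: str, dlc: bool) -> list[str]:
--     # Single flat scan over the whole string with a comment-state flag: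
--     # no line splitting, no nested loop. A newline clears the flag, a '#'
--     # (when dlc is false) sets it, and commands are kept only while clear.
--     out = []
--     skip = False
--     for c in bf:
--         if c == "\n":
--             skip = False
--         elif c == "#" and not dlc:
--             skip = True
--         elif not skip and c in "><+-.,[]":
--             out.append(c)
--     return out
-- ===== Notes on version B (the rewrite author's own statement) =====
-- stated objective: faster
-- what changed: Replaces A's split-into-lines with a nested per-line loop using break/continue by a single flat scan over the whole string driving a comment-state flag (newline clears it, '#' sets it when dlc is false), so no intermediate line list is ever built.
import Mathlib
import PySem

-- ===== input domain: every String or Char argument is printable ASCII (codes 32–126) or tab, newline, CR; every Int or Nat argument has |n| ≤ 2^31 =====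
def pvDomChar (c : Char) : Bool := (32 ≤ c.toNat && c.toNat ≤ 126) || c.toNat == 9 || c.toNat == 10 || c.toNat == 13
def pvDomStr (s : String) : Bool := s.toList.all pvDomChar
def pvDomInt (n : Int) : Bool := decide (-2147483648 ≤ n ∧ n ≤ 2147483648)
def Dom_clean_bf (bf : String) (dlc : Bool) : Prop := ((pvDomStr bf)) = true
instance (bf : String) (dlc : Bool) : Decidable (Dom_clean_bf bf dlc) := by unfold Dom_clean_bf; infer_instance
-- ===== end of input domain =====

-- B replaces A's split-into-lines + nested per-line loop (break/continue) by one flat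
-- scan over the whole string with a comment-state flag; same output, no line list built.


-- ===== PORT A =====
-- inner 'for char in line' loop with its break/continue, carried accumulator 'clean'
def pvLineLoopA (dlc : Bool) (acc : List String) : List Char → List String
  | [] => acc
  | c :: rest =>
    if c == '#' && !dlc then acc                                   -- break
    else if !(c ∈ ['>', '<', '+', '-', '.', ',', '[', ']']) then
      pvLineLoopA dlc acc rest                                      -- continue
    else pvLineLoopA dlc (acc ++ [String.ofList [c]]) rest          -- clean.append(char)

def clean_bf (bf : String) (dlc : Bool) : List String :=
  (PySem.Chars.splitOn bf.toList ['\n']).foldl (fun acc line => pvLineLoopA dlc acc line) []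

-- ===== PORT B =====
def pvValid : List Char := ['>', '<', '+', '-', '.', ',', '[', ']']

-- one step of B's flat scan: state = (out, skip)
def pvStepB (dlc : Bool) (st : List String × Bool) (c : Char) : List String × Bool :=
  if c == '\n' then (st.1, false)
  else if c == '#' && !dlc then (st.1, true)
  else if !st.2 && c ∈ pvValid then (st.1 ++ [String.ofList [c]], st.2)
  else st

def clean_bf_alt (bf : String) (dlc : Bool) : List String :=
  (bf.toList.foldl (pvStepB dlc) ([], false)).1

-- ===== PRECONDITION & SPEC =====
def Spec_clean_bf (bf : String) (dlc : Bool) (out : List String) : Prop := out = clean_bf_alt bf dlc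
instance (bf : String) (dlc : Bool) (out : List String) : Decidable (Spec_clean_bf bf dlc out) := by unfold Spec_clean_bf; infer_instance

-- ===== CLAIM (what is proved, stated in full; the proofs are below) =====
def Claim_equal_clean_bf : Prop := ∀ (bf : String) (dlc : Bool), Dom_clean_bf bf dlc → Spec_clean_bf bf dlc (clean_bf bf dlc)

-- ===== LEMMAS AND PROOFS =====

-- reference recursion for splitting at newlines (pre = line prefix accumulated so far)
def pvSplitNL (pre : List Char) : List Char → List (List Char)
  | [] => [pre]
  | c :: rest => if c = '\n' then pre :: pvSplitNL [] rest else pvSplitNL (pre ++ [c]) rest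

-- functional form of B's scan (skip = comment-state flag)
def pvSpec (dlc : Bool) (skip : Bool) : List Char → List String
  | [] => []
  | c :: r =>
    if c = '\n' then pvSpec dlc false r
    else if c = '#' ∧ dlc = false then pvSpec dlc true r
    else if skip = false ∧ c ∈ pvValid then String.ofList [c] :: pvSpec dlc skip r
    else pvSpec dlc skip r

-- per-line spec of A's inner loop
def pvSeg (dlc : Bool) (line : List Char) : List Char :=
  if dlc then line else line.takeWhile (· ≠ '#')

def pvF (dlc : Bool) (line : List Char) : List String :=
  ((pvSeg dlc line).filter (fun c => c ∈ pvValid)).map (fun c => String.ofList [c])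

theorem pvLineLoopA_eq (dlc : Bool) (line : List Char) (acc : List String) :
    pvLineLoopA dlc acc line = acc ++ pvF dlc line := by
  induction line generalizing acc with
  | nil => cases dlc <;> simp [pvLineLoopA, pvF, pvSeg]
  | cons c rest ih =>
    by_cases hc : c = '#'
    · subst hc
      cases dlc <;> simp [pvLineLoopA, pvF, pvSeg, ih, pvValid]
    · by_cases hm : c ∈ pvValid
      · have hm' := hm
        simp only [pvValid, List.mem_cons, List.not_mem_nil, or_false] at hm'
        cases dlc <;> rcases hm' with h|h|h|h|h|h|h|h <;> subst h <;>
          simp [pvLineLoopA, pvF, pvSeg, ih, pvValid]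
      · have hm' := hm
        simp only [pvValid, List.mem_cons, List.not_mem_nil, or_false, not_or] at hm'
        obtain ⟨h1,h2,h3,h4,h5,h6,h7,h8⟩ := hm'
        cases dlc <;>
          simp [pvLineLoopA, pvF, pvSeg, ih, hc, h1, h2, h3, h4, h5, h6, h7, h8, pvValid]

-- PySem's fuel-based splitOn on ['\n'] is the reference recursion
theorem pvSplitOn_go_eq (fuel : Nat) (l cur : List Char) (acc : List (List Char))
    (h : l.length ≤ fuel) :
    PySem.Chars.splitOn.go ['\n'] fuel l cur acc = acc.reverse ++ pvSplitNL cur.reverse l := by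
  induction fuel generalizing l cur acc with
  | zero =>
    have : l = [] := List.length_eq_zero_iff.mp (Nat.le_zero.mp h)
    subst this
    simp [PySem.Chars.splitOn.go, pvSplitNL]
  | succ n ih =>
    cases l with
    | nil => simp [PySem.Chars.splitOn.go, pvSplitNL]
    | cons c rest =>
      by_cases hc : c = '\n'
      · subst hc
        have hp : List.isPrefixOf ['\n'] ('\n' :: rest) = true := by
          simp [List.isPrefixOf]
        simp only [PySem.Chars.splitOn.go, hp, if_pos]
        rw [show List.drop ['\n'].length ('\n' :: rest) = rest from rfl]
        rw [ih rest [] (cur.reverse :: acc)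
            (by simpa using Nat.le_of_succ_le_succ (by simpa using h))]
        simp [pvSplitNL]
      · have hp : List.isPrefixOf ['\n'] (c :: rest) = false := by
          simp [List.isPrefixOf, hc]
          intro h'; exact absurd h'.symm hc
        simp only [PySem.Chars.splitOn.go, hp]
        rw [if_neg (by simp [hp])]
        rw [ih rest (c :: cur) acc (by simpa using Nat.le_of_succ_le_succ (by simpa using h))]
        simp [pvSplitNL, hc]

theorem pvSplitOn_eq (l : List Char) :
    PySem.Chars.splitOn l ['\n'] = pvSplitNL [] l := by
  unfold PySem.Chars.splitOn
  simpa using pvSplitOn_go_eq (l.length + 1) l [] [] (by omega)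

-- B's foldl equals the functional scan
theorem pvFoldB_eq (dlc : Bool) (l : List Char) (acc : List String) (skip : Bool) :
    (l.foldl (pvStepB dlc) (acc, skip)).1 = acc ++ pvSpec dlc skip l := by
  induction l generalizing acc skip with
  | nil => simp [pvSpec]
  | cons c r ih =>
    simp only [List.foldl]
    by_cases h1 : c = '\n'
    · subst h1; simp [pvStepB, pvSpec, ih]
    · by_cases h2 : c = '#' ∧ dlc = false
      · obtain ⟨hc, hd⟩ := h2; subst hc; subst hd
        simp [pvStepB, pvSpec, ih, h1]
      · by_cases h3 : skip = false ∧ c ∈ pvValid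
        · obtain ⟨hs, hm⟩ := h3; subst hs
          simp [pvStepB, pvSpec, ih, h1, h2, hm]
        · simp [pvStepB, pvSpec, ih, h1, h2, h3]

-- append laws for the per-line spec pvF
theorem pvF_snoc_true (pre : List Char) (c : Char) :
    pvF true (pre ++ [c]) = pvF true pre ++ pvF true [c] := by
  simp [pvF, pvSeg, List.filter_append]

theorem pvF_snoc_hash (pre : List Char) (c : Char) (hp : '#' ∈ pre) :
    pvF false (pre ++ [c]) = pvF false pre := by
  have hlt : (pre.takeWhile (fun x => decide (x ≠ '#'))).length ≠ pre.length := by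
    intro hlen
    have heq : pre.takeWhile (fun x => decide (x ≠ '#')) = pre :=
      (List.takeWhile_prefix _).eq_of_length hlen
    have := List.takeWhile_eq_self_iff.mp heq '#' hp
    simp at this
  simp only [pvF, pvSeg, Bool.false_eq_true, if_false]
  rw [List.takeWhile_append, if_neg hlt]

theorem pvF_snoc_nohash (pre : List Char) (c : Char) (hp : '#' ∉ pre) :
    pvF false (pre ++ [c]) =
      pvF false pre ++ (if c = '#' then [] else pvF false [c]) := by
  have hwpre : pre.takeWhile (fun x => !decide (x = '#')) = pre :=
    List.takeWhile_eq_self_iff.mpr (fun x hx => by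
      simp; intro h'; exact hp (h' ▸ hx))
  have hwpre' : pre.takeWhile (fun x => decide (x ≠ '#')) = pre := by
    simpa using hwpre
  simp only [pvF, pvSeg, Bool.false_eq_true, if_false]
  rw [List.takeWhile_append, if_pos (by rw [hwpre'])]
  by_cases hcc : c = '#'
  · subst hcc; simp [hwpre, hwpre', List.takeWhile]
  · simp [hwpre, hwpre', List.takeWhile, hcc, List.filter_append]

-- pvF summed over the lines equals the flat scan (pre = chars of the current line so far)
theorem pvFlat_eq (dlc : Bool) (l pre : List Char) :
    (pvSplitNL pre l).flatMap (pvF dlc) =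
      pvF dlc pre ++ pvSpec dlc (!dlc && pre.contains '#') l := by
  induction l generalizing pre with
  | nil => simp [pvSplitNL, pvSpec]
  | cons c r ih =>
    by_cases hc : c = '\n'
    · subst hc
      simp only [pvSplitNL]
      rw [if_pos trivial, List.flatMap_cons, ih []]
      simp [pvSpec, pvF, pvSeg]
    · simp only [pvSplitNL, if_neg hc]
      rw [ih (pre ++ [c])]
      rcases Bool.eq_false_or_eq_true dlc with hd | hd
      · subst hd
        rw [pvF_snoc_true]
        simp only [Bool.not_true, Bool.false_and]
        simp only [pvSpec, if_neg hc,
          if_neg (show ¬(c = '#' ∧ (true : Bool) = false) from fun h => by cases h.2)]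
        by_cases hm : c ∈ pvValid
        · simp [pvF, pvSeg, hm]
        · simp [pvF, pvSeg, hm, List.filter]
      · subst hd
        by_cases hp : '#' ∈ pre
        · -- already inside a comment: pvF ignores the new char
          rw [pvF_snoc_hash pre c hp]
          have h1 : (pre ++ [c]).contains '#' = true := by
            simp [List.contains_eq_mem]; exact Or.inl hp
          have h2 : pre.contains '#' = true := by simp [List.contains_eq_mem, hp]
          rw [h1, h2]
          simp only [pvSpec, if_neg hc]
          split_ifs with h3 h4
          · rfl
          · exact absurd h4.1 (by simp)
          · rfl
        · rw [pvF_snoc_nohash pre c hp]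
          have h2 : pre.contains '#' = false := by simp [List.contains_eq_mem, hp]
          rw [h2]
          by_cases hcc : c = '#'
          · subst hcc
            have h1 : (pre ++ ['#']).contains '#' = true := by
              simp [List.contains_eq_mem]
            rw [h1]
            simp [pvSpec, hc]
          · have h1 : (pre ++ [c]).contains '#' = false := by
              simp [List.contains_eq_mem, hcc]
              exact ⟨hp, fun h => hcc h.symm⟩
            rw [h1]
            simp only [pvSpec, if_neg hc,
              if_neg (show ¬(c = '#' ∧ (false : Bool) = false) from fun h => hcc h.1)]
            by_cases hm : c ∈ pvValid
            · simp [pvF, pvSeg, hm, List.takeWhile, hcc]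
            · simp [pvF, pvSeg, hm, List.filter, List.takeWhile, hcc]

-- ===== VERDICT (by name: the statement is the Claim_ definition above) =====
theorem clean_bf_spec : Claim_equal_clean_bf := by
  intro bf dlc _
  unfold Spec_clean_bf clean_bf clean_bf_alt
  rw [pvSplitOn_eq]
  calc (pvSplitNL [] bf.toList).foldl (fun acc line => pvLineLoopA dlc acc line) []
      = (pvSplitNL [] bf.toList).foldl (fun acc line => acc ++ pvF dlc line) [] := by
        exact PySem.List.foldl_congr_mem _ _ _ _ (fun acc line _ => pvLineLoopA_eq dlc line acc)
    _ = (pvSplitNL [] bf.toList).flatMap (pvF dlc) := by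
        rw [PySem.List.foldl_append_eq_flatMap]; simp
    _ = pvF dlc [] ++ pvSpec dlc (!dlc && [].contains '#') bf.toList := pvFlat_eq dlc bf.toList []
    _ = (bf.toList.foldl (pvStepB dlc) ([], false)).1 := by
        rw [pvFoldB_eq]
        simp [pvF, pvSeg]
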